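-- pv_equiv track=rewrite | github.com/sky2rmyth/nba999 | nba-quant-system/app/review_engine.py | _deduplicate_predictions
-- ===== SOURCE A (Python) =====
-- def _deduplicate_predictions(predictions: list[dict]) -> list[dict]:
--     """Keep only the latest prediction per game_id based on created_at."""
--     latest: dict = {}
--     for row in predictions:
--         gid = row.get("game_id")
--         if gid not in latest:
--             latest[gid] = row
--         else:
--             if row.get("created_at", "") > latest[gid].get("created_at", ""):
--                 latest[gid] = row
--     return list(latest.values())
-- ===== SOURCE B (Python) =====
-- def _deduplicate_predictions(predictions: list[dict]) -> list[dict]: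
--     """Keep only the latest prediction per game_id based on created_at.
--
--     Group rows by game_id in one pass (dict keeps first-encounter key order),
--     then take max by created_at per group (max keeps the first maximal row,
--     reproducing the strict-'>' tie-break).
--     """
--     groups: dict = {}
--     for row in predictions:
--         groups.setdefault(row.get("game_id"), []).append(row)
--     return [max(rows, key=lambda r: r.get("created_at", ""))
--             for rows in groups.values()]
-- ===== Notes on version B (the rewrite author's own statement) =====
-- stated objective: alternative
-- what changed: B groups rows by game_id into lists in one pass and then selects max-by-created_at per group, instead of A's running best-so-far dict with an in-place compare-and-replace.
import Mathlib
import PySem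

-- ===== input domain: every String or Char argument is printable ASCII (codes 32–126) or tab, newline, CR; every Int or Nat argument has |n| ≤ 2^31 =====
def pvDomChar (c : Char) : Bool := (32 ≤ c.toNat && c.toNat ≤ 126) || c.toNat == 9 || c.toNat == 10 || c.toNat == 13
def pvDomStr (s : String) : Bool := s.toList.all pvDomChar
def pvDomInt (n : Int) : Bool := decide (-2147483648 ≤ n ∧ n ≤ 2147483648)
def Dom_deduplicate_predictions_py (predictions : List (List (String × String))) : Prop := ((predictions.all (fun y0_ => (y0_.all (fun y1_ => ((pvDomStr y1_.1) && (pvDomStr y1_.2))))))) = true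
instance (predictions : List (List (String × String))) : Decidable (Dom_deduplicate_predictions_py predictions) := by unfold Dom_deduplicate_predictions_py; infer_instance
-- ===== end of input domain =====

-- ===== PORT A =====
-- One honest line: B groups rows by game_id and takes max-by-created_at per group (same cost, different decomposition); A keeps a running best-so-far dict.
-- row.get(k) on an assoc-list row = first match (List.lookup); row.get("created_at", "") with default "".
def pvRowGid (row : List (String × String)) : Option String := List.lookup "game_id" row
def pvRowCa (row : List (String × String)) : String := (List.lookup "created_at" row).getD ""

def deduplicate_predictions_py (predictions : List (List (String × String))) : List (List (String × String)) :=
  (predictions.foldl (fun latest row =>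
      if latest.contains (pvRowGid row) then
        (if pvRowCa (latest.getD (pvRowGid row) []) < pvRowCa row then
          latest.insert (pvRowGid row) row
        else latest)
      else latest.insert (pvRowGid row) row)
    (PySem.Dict.empty)).values

-- ===== PORT B =====
-- max(rows, key=lambda r: r.get("created_at","")) : first maximal row; rows is never empty (getD [] is a totality guard only).
def pvMaxRow (rows : List (List (String × String))) : List (String × String) :=
  (PySem.List.max? rows pvRowCa).getD []

def deduplicate_predictions_py_alt (predictions : List (List (String × String))) : List (List (String × String)) :=
  ((predictions.foldl (fun groups row =>
      groups.modify (pvRowGid row) [] (fun v => v ++ [row]))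
    (PySem.Dict.empty)).values).map pvMaxRow

-- ===== PRECONDITION & SPEC =====
def Spec_deduplicate_predictions_py (predictions : List (List (String × String))) (out : List (List (String × String))) : Prop := out = deduplicate_predictions_py_alt predictions
instance (predictions : List (List (String × String))) (out : List (List (String × String))) : Decidable (Spec_deduplicate_predictions_py predictions out) := by unfold Spec_deduplicate_predictions_py; infer_instance

-- ===== CLAIM (what is proved, stated in full; the proofs are below) =====
def Claim_equal_deduplicate_predictions_py : Prop := ∀ (predictions : List (List (String × String))), Dom_deduplicate_predictions_py predictions → Spec_deduplicate_predictions_py predictions (deduplicate_predictions_py predictions)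

-- ===== LEMMAS AND PROOFS =====

-- pvF maps a (game_id, group) item of B's dict to the corresponding item of A's dict
def pvF (p : Option String × List (List (String × String))) :
    Option String × List (String × String) := (p.1, pvMaxRow p.2)

-- loop invariant: A's dict is B's groups dict with each group collapsed to its max row
def pvRel (dA : PySem.Dict (Option String) (List (String × String)))
    (dB : PySem.Dict (Option String) (List (List (String × String)))) : Prop :=
  dA.items = dB.items.map pvF ∧ dB.keys.Nodup ∧ ∀ p ∈ dB.items, p.2 ≠ []

lemma pvKeys_eq {dA : PySem.Dict (Option String) (List (String × String))}
    {dB : PySem.Dict (Option String) (List (List (String × String)))}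
    (h : dA.items = dB.items.map pvF) : dA.keys = dB.keys := by
  simp only [PySem.Dict.keys, h, List.map_map]; rfl

lemma pvMaxRow_append (v : List (List (String × String))) (m x : List (String × String))
    (hm : PySem.List.max? v pvRowCa = some m) :
    pvMaxRow (v ++ [x]) = if pvRowCa m < pvRowCa x then x else m := by
  have h2 := hm
  rw [pvMaxRow]
  simp only [PySem.List.max?] at h2 ⊢
  rw [List.foldl_append, h2, List.foldl_cons, List.foldl_nil]
  by_cases hlt : pvRowCa m < pvRowCa x <;> simp [hlt]

lemma pvStep (row : List (String × String))
    {dA : PySem.Dict (Option String) (List (String × String))}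
    {dB : PySem.Dict (Option String) (List (List (String × String)))}
    (h : pvRel dA dB) :
    pvRel ((fun latest row =>
      if latest.contains (pvRowGid row) then
        (if pvRowCa (latest.getD (pvRowGid row) []) < pvRowCa row then
          latest.insert (pvRowGid row) row
        else latest)
      else latest.insert (pvRowGid row) row) dA row)
      ((fun groups row => groups.modify (pvRowGid row) [] (fun v => v ++ [row])) dB row) := by
  obtain ⟨hitems, hnd, hne⟩ := h
  have hkeys : dA.keys = dB.keys := pvKeys_eq hitems
  have hndA : dA.keys.Nodup := hkeys ▸ hnd
  set g := pvRowGid row with hg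
  have hcont : dA.contains g = dB.contains g := by
    rw [PySem.Dict.contains_eq_decide_mem_keys, PySem.Dict.contains_eq_decide_mem_keys, hkeys]
  dsimp only
  rw [PySem.Dict.modify]
  by_cases hc : dB.contains g = true
  · -- key already present: B appends to the group, A compares created_at
    obtain ⟨v, hv⟩ : ∃ v, dB.get? g = some v := by
      have := PySem.Dict.contains_eq_isSome_get? dB g
      rw [hc] at this
      exact Option.isSome_iff_exists.mp this.symm
    have hvmem : (g, v) ∈ dB.items := PySem.Dict.mem_items_of_get?_eq_some dB hv
    have hvne : v ≠ [] := hne _ hvmem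
    have hgetDB : dB.getD g [] = v := PySem.Dict.getD_of_get?_eq_some dB [] hv
    obtain ⟨m, hm⟩ : ∃ m, PySem.List.max? v pvRowCa = some m := by
      rcases hmm : PySem.List.max? v pvRowCa with _ | m
      · exact absurd ((PySem.List.max?_eq_none_iff v pvRowCa).mp hmm) hvne
      · exact ⟨m, rfl⟩
    have hmx : pvMaxRow v = m := by simp [pvMaxRow, hm]
    have hAget : dA.getD g [] = m := by
      have hmem : (g, m) ∈ dA.items := by
        rw [hitems]
        exact List.mem_map.mpr ⟨(g, v), hvmem, by simp [pvF, hmx]⟩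
      exact PySem.Dict.getD_of_mem_items dA hmem hndA []
    have huniq : ∀ p ∈ dB.items, p.1 = g → p.2 = v := by
      intro p hp h1
      have h2 : dB.get? p.1 = some p.2 := PySem.Dict.get?_of_mem_items dB hp hnd
      rw [h1, hv] at h2
      exact (Option.some.injEq _ _).mp h2.symm
    have hBitems : (dB.insert g (dB.getD g [] ++ [row])).items =
        dB.items.map (fun p => if p.1 == g then (g, v ++ [row]) else p) := by
      rw [hgetDB]; exact PySem.Dict.items_insert_of_contains dB _ hc
    have happ : pvMaxRow (v ++ [row]) = if pvRowCa m < pvRowCa row then row else m :=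
      pvMaxRow_append v m row hm
    have hcA : dA.contains g = true := by rw [hcont]; exact hc
    rw [hcA, if_pos rfl, hAget]
    refine ⟨?_, ?_, ?_⟩
    · -- items relation
      rw [hBitems, List.map_map]
      split_ifs with hlt
      · rw [PySem.Dict.items_insert_of_contains dA row hcA, hitems, List.map_map]
        refine List.map_congr_left ?_
        intro p hp
        by_cases h1 : p.1 = g
        · simp [Function.comp, pvF, h1, happ, hlt]
        · simp [Function.comp, pvF, beq_eq_false_iff_ne.mpr h1]
      · rw [hitems]
        refine List.map_congr_left ?_
        intro p hp
        by_cases h1 : p.1 = g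
        · have h2 : p.2 = v := huniq p hp h1
          have h3 : pvMaxRow (v ++ [row]) = m := by rw [happ, if_neg hlt]
          simp [Function.comp, pvF, h1, h2, h3, hmx]
        · simp [Function.comp, pvF, beq_eq_false_iff_ne.mpr h1]
    · -- keys stay nodup (insert on an existing key keeps keys)
      rw [hgetDB, PySem.Dict.keys_insert_of_contains dB _ hc]
      exact hnd
    · -- groups stay nonempty
      intro p hp
      rw [hBitems] at hp
      obtain ⟨q, hq, hqeq⟩ := List.mem_map.mp hp
      by_cases h1 : (q.1 == g) = true
      · rw [if_pos h1] at hqeq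
        subst hqeq; simp
      · rw [if_neg h1] at hqeq
        subst hqeq; exact hne q hq
  · -- fresh key: both sides append a new entry
    have hc' : dB.contains g = false := by simpa using hc
    have hcA : dA.contains g = false := by rw [hcont]; exact hc'
    have hgetDB : dB.getD g [] = [] := PySem.Dict.getD_of_not_contains dB [] hc'
    have hgnot : g ∉ dB.keys := by
      have := PySem.Dict.contains_eq_decide_mem_keys dB g
      rw [hc'] at this
      simpa using this.symm
    rw [hcA, if_neg (by simp)]
    rw [hgetDB]
    refine ⟨?_, ?_, ?_⟩
    · rw [PySem.Dict.items_insert_of_not_contains dA row hcA,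
        PySem.Dict.items_insert_of_not_contains dB _ hc',
        hitems, List.map_append]
      simp [pvF, pvMaxRow, PySem.List.max?]
    · rw [PySem.Dict.keys_insert_of_not_contains dB _ hc']
      refine List.Nodup.append hnd (List.nodup_singleton _) ?_
      intro a ha hag
      simp only [List.mem_singleton] at hag
      exact hgnot (hag ▸ ha)
    · intro p hp
      rw [PySem.Dict.items_insert_of_not_contains dB _ hc'] at hp
      rcases List.mem_append.mp hp with hp | hp
      · exact hne p hp
      · simp only [List.mem_singleton] at hp
        subst hp; simp

lemma pvMain (l : List (List (String × String))) :
    ∀ dA dB, pvRel dA dB →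
    pvRel (l.foldl (fun latest row =>
      if latest.contains (pvRowGid row) then
        (if pvRowCa (latest.getD (pvRowGid row) []) < pvRowCa row then
          latest.insert (pvRowGid row) row
        else latest)
      else latest.insert (pvRowGid row) row) dA)
      (l.foldl (fun groups row => groups.modify (pvRowGid row) [] (fun v => v ++ [row])) dB) := by
  induction l with
  | nil => intro dA dB h; simpa using h
  | cons r t ih =>
    intro dA dB h
    simp only [List.foldl_cons]
    exact ih _ _ (pvStep r h)

-- ===== VERDICT (by name: the statement is the Claim_ definition above) =====
theorem deduplicate_predictions_py_spec : Claim_equal_deduplicate_predictions_py := by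
  intro predictions _
  unfold Spec_deduplicate_predictions_py deduplicate_predictions_py deduplicate_predictions_py_alt
  have h := pvMain predictions PySem.Dict.empty PySem.Dict.empty
    ⟨rfl, List.nodup_nil, by intro p hp; simp [PySem.Dict.empty] at hp⟩
  simp only [PySem.Dict.values, h.1, List.map_map]
  exact List.map_congr_left (fun p _ => rfl)
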